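-- pv_equiv track=rewrite | github.com/sakthi3119/Trust-AI | backend/services/diversity_service.py | ensure_category_diversity
-- ===== SOURCE A (Python) =====
-- from typing import List, Dict, Tuple
--
-- def ensure_category_diversity(
--     ranked: List[dict],
--     min_categories: int = 2,
--     pool: List[dict] = None,
-- ) -> List[dict]:
--     """
--     Post-process ranked list: guarantee at least `min_categories` distinct
--     sub_category values. If needed, swap in items from the pool.
--     """
--     seen_categories = set()
--     result = []
--
--     for item in ranked:
--         seen_categories.add(item.get("sub_category"))
--         result.append(item)
--
--     if len(seen_categories) >= min_categories or not pool:
--         return result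
--
--     # Identify missing categories and inject one item per missing category
--     pool_by_cat: Dict[str, list] = {}
--     for p in pool:
--         cat = p.get("sub_category")
--         if cat not in seen_categories:
--             pool_by_cat.setdefault(cat, []).append(p)
--
--     for cat, items in pool_by_cat.items():
--         if len(seen_categories) >= min_categories:
--             break
--         if items:
--             # Replace the last item in result with a diverse pick
--             diverse_item = items[0]
--             result[-1] = diverse_item
--             seen_categories.add(cat)
--
--     return result
-- ===== SOURCE B (Python) =====
-- def ensure_category_diversity(ranked, min_categories=2, pool=None):
--     result = list(ranked)
--     seen = {item.get("sub_category") for item in ranked}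
--     if len(seen) >= min_categories or not pool:
--         return result
--     for p in pool:
--         if len(seen) >= min_categories:
--             break
--         cat = p.get("sub_category")
--         if cat in seen:
--             continue
--         result[-1] = p
--         seen.add(cat)
--     return result
-- ===== Notes on version B (the rewrite author's own statement) =====
-- stated objective: simpler
-- what changed: B drops A's pool_by_cat grouping dict (build-table-then-iterate) and injects diverse pool items in one direct pass over pool, skipping already-seen categories; the copy of ranked and the early return stay.
import Mathlib
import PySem

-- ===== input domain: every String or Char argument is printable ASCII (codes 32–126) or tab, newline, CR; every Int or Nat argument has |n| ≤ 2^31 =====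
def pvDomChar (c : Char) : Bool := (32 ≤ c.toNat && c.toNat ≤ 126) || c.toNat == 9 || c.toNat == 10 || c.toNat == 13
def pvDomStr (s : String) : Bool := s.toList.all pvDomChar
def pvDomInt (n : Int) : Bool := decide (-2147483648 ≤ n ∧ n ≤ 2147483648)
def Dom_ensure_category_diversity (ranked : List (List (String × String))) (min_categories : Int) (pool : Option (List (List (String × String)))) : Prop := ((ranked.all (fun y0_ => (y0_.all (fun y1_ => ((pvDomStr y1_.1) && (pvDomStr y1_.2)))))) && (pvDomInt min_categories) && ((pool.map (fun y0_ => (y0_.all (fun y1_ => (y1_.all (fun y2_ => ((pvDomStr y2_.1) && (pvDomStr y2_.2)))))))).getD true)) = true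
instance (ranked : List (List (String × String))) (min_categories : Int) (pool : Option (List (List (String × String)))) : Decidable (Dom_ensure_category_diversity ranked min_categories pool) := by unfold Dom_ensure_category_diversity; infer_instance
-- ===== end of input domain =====

-- B replaces A's build-a-grouping-dict-then-iterate second phase by one direct pass over pool (simpler decomposition, same cost).

-- shared accessor: item.get("sub_category") on the Python dict `item` (given as an assoc list)
def ecdCat (item : List (String × String)) : Option String :=
  (PySem.Dict.ofList item).get? "sub_category"

-- ===== PORT A =====
-- for cat, items in pool_by_cat.items(): …  (break / result[-1] = items[0] / seen.add(cat));
-- result[-1] = x is ported as result.dropLast ++ [x] (exact for nonempty result; Pre_ excludes the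
-- IndexError case where result is empty when a replacement is attempted)
def ecdLoopA : List (Option String × List (List (String × String))) → PySem.Set (Option String) → Int → List (List (String × String)) → List (List (String × String))
  | [], _, _, result => result
  | (cat, items) :: rest, seen, minc, result =>
    if PySem.Set.len seen ≥ minc then result
    else match items with
      | [] => ecdLoopA rest seen minc result
      | d :: _ => ecdLoopA rest (PySem.Set.add seen cat) minc (result.dropLast ++ [d])

def ensure_category_diversity (ranked : List (List (String × String))) (min_categories : Int) (pool : Option (List (List (String × String)))) : List (List (String × String)) :=
  let sr := ranked.foldl (fun sr item => (PySem.Set.add sr.1 (ecdCat item), sr.2 ++ [item])) (PySem.Set.empty, [])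
  let seen_categories := sr.1
  let result := sr.2
  if PySem.Set.len seen_categories ≥ min_categories ∨ pool.getD [] = [] then result
  else
    let pool_by_cat : PySem.Dict (Option String) (List (List (String × String))) :=
      (pool.getD []).foldl
        (fun d p =>
          let cat := ecdCat p
          if PySem.Set.contains seen_categories cat then d
          else d.modify cat [] (· ++ [p]))   -- setdefault(cat, []).append(p)
        PySem.Dict.empty
    ecdLoopA pool_by_cat.items seen_categories min_categories result

-- ===== PORT B =====
-- for p in pool: break / skip seen / result[-1] = p; seen.add(cat)
def ecdLoopB : List (List (String × String)) → PySem.Set (Option String) → Int → List (List (String × String)) → List (List (String × String))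
  | [], _, _, result => result
  | p :: rest, seen, minc, result =>
    if PySem.Set.len seen ≥ minc then result
    else
      let cat := ecdCat p
      if PySem.Set.contains seen cat then ecdLoopB rest seen minc result
      else ecdLoopB rest (PySem.Set.add seen cat) minc (result.dropLast ++ [p])

def ensure_category_diversity_alt (ranked : List (List (String × String))) (min_categories : Int) (pool : Option (List (List (String × String)))) : List (List (String × String)) :=
  let result := ranked
  let seen := PySem.Set.ofList (ranked.map ecdCat)
  if PySem.Set.len seen ≥ min_categories ∨ pool.getD [] = [] then result
  else ecdLoopB (pool.getD []) seen min_categories result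

-- ===== PRECONDITION & SPEC =====
-- Pre_ excludes exactly the inputs on which Python A raises IndexError at `result[-1] = …`:
-- ranked empty while min_categories ≥ 1 and pool is non-empty (B raises there too).
def Pre_ensure_category_diversity (ranked : List (List (String × String))) (min_categories : Int) (pool : Option (List (List (String × String)))) : Prop :=
  ranked ≠ [] ∨ min_categories ≤ 0 ∨ pool.getD [] = []
instance (ranked : List (List (String × String))) (min_categories : Int) (pool : Option (List (List (String × String)))) : Decidable (Pre_ensure_category_diversity ranked min_categories pool) := by unfold Pre_ensure_category_diversity; infer_instance

def pvWitness_ensure_category_diversity : (List (List (String × String))) × Int × (Option (List (List (String × String)))) :=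
  ([[("sub_category", "a"), ("t", "x")], [("sub_category", "a")]], 2, some [[("sub_category", "b")], [("sub_category", "c")]])

def Spec_ensure_category_diversity (ranked : List (List (String × String))) (min_categories : Int) (pool : Option (List (List (String × String)))) (out : List (List (String × String))) : Prop := out = ensure_category_diversity_alt ranked min_categories pool
instance (ranked : List (List (String × String))) (min_categories : Int) (pool : Option (List (List (String × String)))) (out : List (List (String × String))) : Decidable (Spec_ensure_category_diversity ranked min_categories pool out) := by unfold Spec_ensure_category_diversity; infer_instance

-- ===== CLAIM (what is proved, stated in full; the proofs are below) =====
def Claim_equal_ensure_category_diversity : Prop := ∀ (ranked : List (List (String × String))) (min_categories : Int) (pool : Option (List (List (String × String)))), Dom_ensure_category_diversity ranked min_categories pool → Pre_ensure_category_diversity ranked min_categories pool → Spec_ensure_category_diversity ranked min_categories pool (ensure_category_diversity ranked min_categories pool)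

-- ===== LEMMAS AND PROOFS =====

-- key/head abstraction of a dict entry: ecdLoopA only looks at the key and the first value element
def ecdKH (e : Option String × List (List (String × String))) : Option String × Option (List (String × String)) :=
  (e.1, e.2.head?)

-- first-appearance spine of A's pool_by_cat: (cat, first item of cat) for each fresh cat, in pool order
def ecdFh : List (List (String × String)) → PySem.Set (Option String) → List (Option String) → List (Option String × List (String × String))
  | [], _, _ => []
  | p :: rest, s0, ks =>
    let c := ecdCat p
    if PySem.Set.contains s0 c then ecdFh rest s0 ks
    else if ks.contains c then ecdFh rest s0 ks
    else (c, p) :: ecdFh rest s0 (ks ++ [c])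

theorem ecdLoopA_congr (l₁ l₂ : List (Option String × List (List (String × String))))
    (h : l₁.map ecdKH = l₂.map ecdKH) (seen : PySem.Set (Option String)) (minc : Int)
    (result : List (List (String × String))) :
    ecdLoopA l₁ seen minc result = ecdLoopA l₂ seen minc result := by
  induction l₁ generalizing l₂ seen result with
  | nil => cases l₂ with
    | nil => rfl
    | cons b t => simp [List.map, ecdKH] at h
  | cons a t ih =>
    cases l₂ with
    | nil => simp [List.map, ecdKH] at h
    | cons b t₂ =>
      obtain ⟨c, its⟩ := a
      obtain ⟨c₂, its₂⟩ := b
      simp only [List.map, ecdKH, List.cons.injEq, Prod.mk.injEq] at h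
      obtain ⟨⟨hc, hh⟩, ht⟩ := h
      subst hc
      cases its with
      | nil =>
        cases its₂ with
        | nil =>
          simp only [ecdLoopA]
          split
          · rfl
          · exact ih t₂ ht seen result
        | cons x xs => simp at hh
      | cons x xs =>
        cases its₂ with
        | nil => simp at hh
        | cons y ys =>
          simp only [List.head?, Option.some.injEq] at hh
          subst hh
          simp only [ecdLoopA]
          split
          · rfl
          · exact ih t₂ ht (PySem.Set.add seen c) (result.dropLast ++ [x])

-- the entry a contained key is found at (specific to our dict value type)
theorem ecdFindEntry (d : PySem.Dict (Option String) (List (List (String × String)))) (k : Option String)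
    (hc : d.contains k = true) :
    ∃ q, d.items.find? (fun e => e.1 == k) = some q ∧ q ∈ d.items ∧ q.1 = k := by
  simp only [PySem.Dict.contains, List.any_eq_true] at hc
  obtain ⟨x, hx, hbx⟩ := hc
  cases hf : d.items.find? (fun e => e.1 == k) with
  | none => exact absurd hbx (by simpa using List.find?_eq_none.mp hf x hx)
  | some q => exact ⟨q, rfl, List.mem_of_find?_eq_some hf, by simpa using List.find?_some hf⟩

theorem ecdGetD_of_not_contains (d : PySem.Dict (Option String) (List (List (String × String)))) (k : Option String)
    (hc : ¬ d.contains k = true) :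
    d.getD k [] = [] := by
  simp only [PySem.Dict.contains, List.any_eq_true] at hc
  have hf : d.items.find? (fun e => e.1 == k) = none := by
    apply List.find?_eq_none.mpr
    intro x hx hbx
    exact hc ⟨x, hx, hbx⟩
  simp [PySem.Dict.getD, PySem.Dict.get?, hf]

-- the build loop of A, seen through ecdKH, is the spine ecdFh
theorem ecdBuild_heads (pool : List (List (String × String))) (s0 : PySem.Set (Option String))
    (d : PySem.Dict (Option String) (List (List (String × String))))
    (hne : ∀ e ∈ d.items, e.2 ≠ []) (hnd : (d.items.map (·.1)).Nodup) :
    ((pool.foldl (fun d p =>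
        let cat := ecdCat p
        if PySem.Set.contains s0 cat then d else d.modify cat [] (· ++ [p])) d).items).map ecdKH
      = d.items.map ecdKH ++ (ecdFh pool s0 (d.items.map (·.1))).map (fun e => (e.1, some e.2)) := by
  induction pool generalizing d with
  | nil => simp [ecdFh]
  | cons p rest ih =>
    simp only [List.foldl, ecdFh]
    by_cases hs : PySem.Set.contains s0 (ecdCat p) = true
    · simp only [hs, if_true]
      exact ih d hne hnd
    · simp only [hs, if_false, Bool.false_eq_true]
      by_cases hc : d.contains (ecdCat p) = true
      · -- existing key: entry value extended; ecdKH-image and keys unchanged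
        have hks : (d.items.map (·.1)).contains (ecdCat p) = true := by
          obtain ⟨q, _, hqm, hqk⟩ := ecdFindEntry d (ecdCat p) hc
          simpa using List.mem_map.mpr ⟨q, hqm, hqk⟩
        rw [if_pos hks]
        obtain ⟨q, hf, hqm, hqk⟩ := ecdFindEntry d (ecdCat p) hc
        have hval : d.getD (ecdCat p) [] = q.2 := by simp [PySem.Dict.getD, PySem.Dict.get?, hf]
        set d' := d.modify (ecdCat p) [] (· ++ [p]) with hd'
        have hitems : d'.items = d.items.map (fun e => if (e.1 == ecdCat p) = true then (ecdCat p, (d.getD (ecdCat p) []) ++ [p]) else e) := by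
          simp [hd', PySem.Dict.modify, PySem.Dict.insert, hc]
        have hkeys : d'.items.map (·.1) = d.items.map (·.1) := by
          rw [hitems, List.map_map]
          apply List.map_congr_left
          intro e _
          by_cases he : (e.1 == ecdCat p) = true
          · simp [Function.comp, (beq_iff_eq.mp he).symm]
          · simp [Function.comp, he]
        have hkh : d'.items.map ecdKH = d.items.map ecdKH := by
          rw [hitems, List.map_map]
          apply List.map_congr_left
          intro e he
          by_cases heq : (e.1 == ecdCat p) = true
          · have h1 : e.1 = ecdCat p := beq_iff_eq.mp heq
            have hqe : q = e := List.inj_on_of_nodup_map hnd hqm he (hqk.trans h1.symm)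
            have hv2 : d.getD (ecdCat p) [] = e.2 := by rw [hval, hqe]
            have hnz : e.2 ≠ [] := hne e he
            simp only [Function.comp, ecdKH, hv2, h1]
            cases hzz : e.2 with
            | nil => exact absurd hzz hnz
            | cons z zs => simp
          · simp [Function.comp, heq]
        have hne' : ∀ e ∈ d'.items, e.2 ≠ [] := by
          intro e he
          rw [hitems] at he
          obtain ⟨e0, he0, heq⟩ := List.mem_map.mp he
          by_cases h0 : (e0.1 == ecdCat p) = true
          · simp only [h0, if_true] at heq
            subst heq; simp [hval]
          · simp only [h0, if_false, Bool.false_eq_true] at heq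
            subst heq; exact hne e0 he0
        have hnd' : (d'.items.map (·.1)).Nodup := by rw [hkeys]; exact hnd
        rw [ih d' hne' hnd', hkh, hkeys]
      · -- fresh key: a new entry is appended at the end
        have hks : ¬ (d.items.map (·.1)).contains (ecdCat p) = true := by
          intro hcon
          have : ecdCat p ∈ d.items.map (·.1) := by simpa using hcon
          obtain ⟨e, he, hek⟩ := List.mem_map.mp this
          exact hc (by
            simp only [PySem.Dict.contains, List.any_eq_true]
            exact ⟨e, he, by simp [hek]⟩)
        rw [if_neg hks]
        set d' := d.modify (ecdCat p) [] (· ++ [p]) with hd'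
        have hitems : d'.items = d.items ++ [(ecdCat p, [p])] := by
          simp [hd', PySem.Dict.modify, PySem.Dict.insert, hc, ecdGetD_of_not_contains d _ hc]
        have hne' : ∀ e ∈ d'.items, e.2 ≠ [] := by
          intro e he
          rw [hitems, List.mem_append] at he
          rcases he with he | he
          · exact hne e he
          · simp at he; subst he; simp
        have hmem : ecdCat p ∉ d.items.map (·.1) := by simpa using hks
        have hnd' : (d'.items.map (·.1)).Nodup := by
          rw [hitems, List.map_append]
          apply List.Nodup.append hnd (List.nodup_singleton _)
          intro a ha hb
          simp only [List.map_cons, List.mem_singleton] at hb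
          subst hb
          exact hmem ha
        rw [ih d' hne' hnd', hitems]
        simp [ecdKH, List.map_append, List.append_assoc]

-- ecdLoopA returns immediately once the threshold is met
theorem ecdLoopA_of_ge (l : List (Option String × List (List (String × String))))
    (seen : PySem.Set (Option String)) (minc : Int) (result : List (List (String × String)))
    (hm : PySem.Set.len seen ≥ minc) : ecdLoopA l seen minc result = result := by
  cases l with
  | nil => rfl
  | cons e t =>
    obtain ⟨c, its⟩ := e
    simp only [ecdLoopA]
    rw [if_pos hm]

theorem ecdSContains_add (s : PySem.Set (Option String)) (x c : Option String) :
    PySem.Set.contains (PySem.Set.add s x) c = true ↔ PySem.Set.contains s c = true ∨ c = x := by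
  simp only [PySem.Set.contains, List.contains_eq_mem, PySem.Set.mem_add, Bool.decide_or,
    Bool.or_eq_true, decide_eq_true_eq]

theorem ecdKContains_append (l : List (Option String)) (a c : Option String) :
    ((l ++ [a]).contains c = true) ↔ (l.contains c = true ∨ c = a) := by
  simp only [List.contains_eq_mem, List.mem_append, List.mem_cons, List.not_mem_nil, or_false,
    Bool.decide_or, Bool.or_eq_true, decide_eq_true_eq]

-- running A's per-category loop over the spine equals B's direct pass
theorem ecdBridge (pool : List (List (String × String))) (s0 : PySem.Set (Option String))
    (ks : List (Option String)) (seen : PySem.Set (Option String)) (minc : Int)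
    (result : List (List (String × String)))
    (h1 : ∀ c, PySem.Set.contains s0 c = true → PySem.Set.contains seen c = true)
    (h2 : ∀ c, PySem.Set.contains seen c = true → PySem.Set.contains s0 c = true ∨ ks.contains c = true)
    (h3 : ∀ c, ks.contains c = true → PySem.Set.contains seen c = true) :
    ecdLoopA ((ecdFh pool s0 ks).map (fun e => (e.1, [e.2]))) seen minc result
      = ecdLoopB pool seen minc result := by
  induction pool generalizing ks seen result with
  | nil => rfl
  | cons p rest ih =>
    simp only [ecdFh, ecdLoopB]
    by_cases hm : PySem.Set.len seen ≥ minc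
    · rw [if_pos hm]
      by_cases hs : PySem.Set.contains s0 (ecdCat p) = true
      · rw [if_pos hs]
        exact ecdLoopA_of_ge _ _ _ _ hm
      · rw [if_neg hs]
        by_cases hk : ks.contains (ecdCat p) = true
        · rw [if_pos hk]
          exact ecdLoopA_of_ge _ _ _ _ hm
        · rw [if_neg hk]
          simp only [List.map_cons]
          exact ecdLoopA_of_ge _ _ _ _ hm
    · rw [if_neg hm]
      by_cases hs : PySem.Set.contains s0 (ecdCat p) = true
      · rw [if_pos hs, if_pos (h1 _ hs)]
        exact ih ks seen result h1 h2 h3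
      · rw [if_neg hs]
        by_cases hk : ks.contains (ecdCat p) = true
        · rw [if_pos hk, if_pos (h3 _ hk)]
          exact ih ks seen result h1 h2 h3
        · rw [if_neg hk]
          have hseen : ¬ PySem.Set.contains seen (ecdCat p) = true := fun hcon =>
            (h2 _ hcon).elim hs hk
          rw [if_neg hseen]
          simp only [List.map_cons, ecdLoopA]
          rw [if_neg hm]
          refine ih (ks ++ [ecdCat p]) (PySem.Set.add seen (ecdCat p)) (result.dropLast ++ [p]) ?_ ?_ ?_
          · intro c hc
            exact (ecdSContains_add _ _ _).mpr (Or.inl (h1 c hc))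
          · intro c hc
            rcases (ecdSContains_add _ _ _).mp hc with h | h
            · rcases h2 c h with h' | h'
              · exact Or.inl h'
              · exact Or.inr ((ecdKContains_append _ _ _).mpr (Or.inl h'))
            · exact Or.inr ((ecdKContains_append _ _ _).mpr (Or.inr h))
          · intro c hc
            rcases (ecdKContains_append _ _ _).mp hc with h | h
            · exact (ecdSContains_add _ _ _).mpr (Or.inl (h3 c h))
            · exact (ecdSContains_add _ _ _).mpr (Or.inr h)

-- A's first loop, as a pair-fold, computes (set of categories, copy of ranked)
theorem ecdFirstLoop (ranked : List (List (String × String)))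
    (s : PySem.Set (Option String)) (r : List (List (String × String))) :
    ranked.foldl (fun sr item => (PySem.Set.add sr.1 (ecdCat item), sr.2 ++ [item])) (s, r)
      = ((ranked.map ecdCat).foldl PySem.Set.add s, r ++ ranked) := by
  induction ranked generalizing s r with
  | nil => simp
  | cons a t ih => simp [List.foldl, ih]

-- ===== VERDICT (by name: the statement is the Claim_ definition above) =====
theorem ensure_category_diversity_spec : Claim_equal_ensure_category_diversity := by
  intro ranked minc pool _ _
  unfold Spec_ensure_category_diversity ensure_category_diversity ensure_category_diversity_alt
  rw [ecdFirstLoop]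
  have hseen : PySem.Set.ofList (ranked.map ecdCat) = (ranked.map ecdCat).foldl PySem.Set.add PySem.Set.empty := by
    simp [PySem.Set.ofList_eq_foldl]
  simp only [← hseen, List.nil_append]
  set seen0 := PySem.Set.ofList (ranked.map ecdCat) with hs0
  by_cases hcond : PySem.Set.len seen0 ≥ minc ∨ pool.getD [] = []
  · rw [if_pos hcond, if_pos hcond]
  · rw [if_neg hcond, if_neg hcond]
    have hbuild := ecdBuild_heads (pool.getD []) seen0 PySem.Dict.empty (by intro e he; simp [PySem.Dict.empty] at he) (by simp [PySem.Dict.empty])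
    have hempty : (PySem.Dict.empty : PySem.Dict (Option String) (List (List (String × String)))).items = [] := rfl
    rw [hempty] at hbuild
    simp only [List.map_nil, List.nil_append] at hbuild
    have hcongr := ecdLoopA_congr _ ((ecdFh (pool.getD []) seen0 []).map (fun e => (e.1, [e.2])))
      (by rw [hbuild, List.map_map]; rfl) seen0 minc ranked
    rw [hcongr]
    exact ecdBridge (pool.getD []) seen0 [] seen0 minc ranked
      (fun c h => h) (fun c h => Or.inl h) (fun c h => by simp at h)
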